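-- pv_equiv track=rewrite | github.com/JeroenLam/The-Number-Game | code/test.py | generate_products
-- ===== SOURCE A (Python) =====
-- def generate_products(candidate_pairs):
--     products = {}
--     for tuple_pair in candidate_pairs:
--         (i, j) = tuple_pair
--         product = i * j
--         if product not in products:
--             products[product] = [tuple_pair]
--         else:
--             products[product].append(tuple_pair)
--     return products
-- ===== SOURCE B (Python) =====
-- def generate_products(candidate_pairs):
--     keys = list(dict.fromkeys(i * j for (i, j) in candidate_pairs))
--     return {p: [pair for pair in candidate_pairs if pair[0] * pair[1] == p]
--             for p in keys}
-- ===== Notes on version B (the rewrite author's own statement) =====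
-- stated objective: alternative
-- what changed: Replaces A's single hashing pass that mutates per-key lists with a two-phase decomposition: first deduplicate the products in first-occurrence order, then build the dict by filtering the pair list once per distinct product.
import Mathlib
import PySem

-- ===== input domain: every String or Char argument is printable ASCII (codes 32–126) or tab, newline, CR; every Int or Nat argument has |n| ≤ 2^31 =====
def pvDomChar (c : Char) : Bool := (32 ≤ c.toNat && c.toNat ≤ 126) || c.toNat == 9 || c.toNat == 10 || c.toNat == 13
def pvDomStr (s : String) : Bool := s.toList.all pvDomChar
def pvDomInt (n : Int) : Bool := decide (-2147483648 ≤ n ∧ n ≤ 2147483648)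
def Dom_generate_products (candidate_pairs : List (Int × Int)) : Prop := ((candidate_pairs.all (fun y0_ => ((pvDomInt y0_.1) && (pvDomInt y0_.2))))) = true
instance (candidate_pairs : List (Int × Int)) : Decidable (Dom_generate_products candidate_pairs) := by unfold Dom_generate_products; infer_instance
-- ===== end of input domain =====

-- B replaces A's single dict-building pass (mutating per-key lists) by a two-phase
-- decomposition: ordered dedup of the products, then one filter of the pair list per
-- distinct product ("alternative" objective; not claimed faster).

-- ===== PORT A =====
-- A: one pass over candidate_pairs, keeping a dict product ↦ list of pairs.
def generate_products (candidate_pairs : List (Int × Int)) : List (Int × List (Int × Int)) :=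
  (candidate_pairs.foldl
    (fun products tuple_pair =>
      let product := tuple_pair.1 * tuple_pair.2
      if products.contains product = false then
        products.insert product [tuple_pair]
      else
        products.modify product [] (fun l => l ++ [tuple_pair]))
    PySem.Dict.empty).items

-- ===== PORT B =====
-- B: dedup the products in first-occurrence order, then a dict comprehension
-- {p: [pair for pair in candidate_pairs if pair[0]*pair[1] == p] for p in keys};
-- keys is duplicate-free, so the comprehension's items are exactly this map.
def generate_products_alt (candidate_pairs : List (Int × Int)) : List (Int × List (Int × Int)) :=
  let keys := PySem.List.dedup (candidate_pairs.map (fun tp => tp.1 * tp.2))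
  keys.map (fun p => (p, candidate_pairs.filter (fun pair => pair.1 * pair.2 == p)))

-- ===== PRECONDITION & SPEC =====
def Spec_generate_products (candidate_pairs : List (Int × Int)) (out : List (Int × List (Int × Int))) : Prop := out = generate_products_alt candidate_pairs
instance (candidate_pairs : List (Int × Int)) (out : List (Int × List (Int × Int))) : Decidable (Spec_generate_products candidate_pairs out) := by unfold Spec_generate_products; infer_instance

-- ===== CLAIM (what is proved, stated in full; the proofs are below) =====
def Claim_equal_generate_products : Prop := ∀ (candidate_pairs : List (Int × Int)), Dom_generate_products candidate_pairs → Spec_generate_products candidate_pairs (generate_products candidate_pairs)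

-- ===== LEMMAS AND PROOFS =====

-- A's loop body is exactly 'append tuple_pair to the entry at its product' (modify).
theorem gp_step_eq (d : PySem.Dict Int (List (Int × Int))) (tp : Int × Int) :
    (if d.contains (tp.1 * tp.2) = false then
        d.insert (tp.1 * tp.2) [tp]
      else
        d.modify (tp.1 * tp.2) [] (fun l => l ++ [tp]))
      = d.modify (tp.1 * tp.2) [] (fun l => l ++ [tp]) := by
  by_cases h : d.contains (tp.1 * tp.2) = false
  · simp [h, PySem.Dict.modify, PySem.Dict.insert, PySem.Dict.getD_of_not_contains d _ h]
  · simp [h]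

-- ===== VERDICT (by name: the statement is the Claim_ definition above) =====
theorem generate_products_spec : Claim_equal_generate_products := by
  intro cp _
  unfold Spec_generate_products generate_products generate_products_alt
  have hstep :
      (fun (products : PySem.Dict Int (List (Int × Int))) (tuple_pair : Int × Int) =>
        let product := tuple_pair.1 * tuple_pair.2
        if products.contains product = false then
          products.insert product [tuple_pair]
        else
          products.modify product [] (fun l => l ++ [tuple_pair]))
      = fun d tp => d.modify (tp.1 * tp.2) [] (fun l => l ++ [tp]) :=
    funext fun d => funext fun tp => gp_step_eq d tp
  rw [hstep]
  -- rewrite the fold over cp as a fold over (product, pair) entries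
  have hmap :
      cp.foldl (fun d tp => d.modify (tp.1 * tp.2) [] (fun l => l ++ [tp])) PySem.Dict.empty
      = (cp.map (fun tp => (tp.1 * tp.2, tp))).foldl
          (fun d p => d.modify p.1 [] (fun l => l ++ [p.2])) PySem.Dict.empty := by
    rw [List.foldl_map]
  rw [hmap]
  set l := cp.map (fun tp => (tp.1 * tp.2, tp)) with hl
  set D := l.foldl (fun d p => d.modify p.1 [] (fun l => l ++ [p.2])) PySem.Dict.empty with hD
  have hnd : D.keys.Nodup := by
    rw [hD]
    exact PySem.Dict.nodup_keys_foldl_modify_key l (fun p => p.1) []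
      (fun _ p => fun v => v ++ [p.2]) PySem.Dict.empty (by simp)
  have hkeys : D.keys = PySem.List.dedup (cp.map (fun tp => tp.1 * tp.2)) := by
    rw [hD, PySem.Dict.keys_foldl_modify_key]
    simp [hl, List.map_map, Function.comp_def, PySem.Set.update_nil_left]
  have hget : ∀ c, D.getD c [] = cp.filter (fun pair => pair.1 * pair.2 == c) := by
    intro c
    rw [hD, PySem.Dict.getD_foldl_modify_append]
    simp [hl, List.filter_map, Function.comp_def, List.map_map]
  rw [PySem.Dict.items_eq_map_keys D hnd [], hkeys]
  exact List.map_congr_left (fun c _ => by rw [hget c])
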